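-- pv_equiv track=rewrite | github.com/hideaway007/paperforge-cn | runtime/pipeline.py | _latest_human_decision
-- ===== SOURCE A (Python) =====
-- from typing import Optional
--
-- def _latest_human_decision(state: dict, gate_id: str) -> Optional[dict]:
--     decisions = state.get("human_decision_log", [])
--     if not isinstance(decisions, list):
--         return None
--     for record in reversed(decisions):
--         if isinstance(record, dict) and record.get("gate_id") == gate_id:
--             return record
--     return None
-- ===== SOURCE B (Python) =====
-- from typing import Optional
--
-- def _latest_human_decision(state: dict, gate_id: str) -> Optional[dict]:
--     decisions = state.get("human_decision_log", [])
--     if not isinstance(decisions, list):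
--         return None
--     index = {}
--     for record in decisions:
--         if isinstance(record, dict):
--             index[record.get("gate_id")] = record
--     return index.get(gate_id)
-- ===== Notes on version B (the rewrite author's own statement) =====
-- stated objective: idiomatic
-- what changed: Replaced the reverse scan with early return by a single forward pass that builds a gate_id-keyed index dict (later records overwrite earlier ones) followed by one lookup.
import Mathlib
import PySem

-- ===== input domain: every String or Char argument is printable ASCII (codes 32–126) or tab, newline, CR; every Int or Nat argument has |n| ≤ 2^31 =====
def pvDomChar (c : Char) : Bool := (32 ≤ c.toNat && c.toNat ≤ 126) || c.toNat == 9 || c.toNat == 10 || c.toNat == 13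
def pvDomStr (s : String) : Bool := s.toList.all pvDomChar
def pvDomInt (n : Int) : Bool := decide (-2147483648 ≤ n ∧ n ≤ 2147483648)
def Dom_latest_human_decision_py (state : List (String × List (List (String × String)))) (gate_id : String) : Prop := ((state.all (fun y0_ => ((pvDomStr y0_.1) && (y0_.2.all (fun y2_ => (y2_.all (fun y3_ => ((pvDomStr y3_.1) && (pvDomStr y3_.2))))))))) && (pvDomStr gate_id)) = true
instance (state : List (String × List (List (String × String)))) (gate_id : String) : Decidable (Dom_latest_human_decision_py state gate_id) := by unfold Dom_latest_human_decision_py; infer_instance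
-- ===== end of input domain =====

-- B replaces A's reverse scan-with-early-return by building a gate_id-keyed index dict in one
-- forward pass (later records overwrite earlier ones) and doing a single lookup (idiomatic).

-- ===== PORT A =====
-- the 'for record in reversed(decisions): if record.get("gate_id") == gate_id: return record' loop
def pvScanRev (decisions : List (List (String × String))) (gate_id : String) :
    Option (List (String × String)) :=
  match decisions with
  | [] => none
  | r :: rest =>
    if (PySem.Dict.ofList r).get? "gate_id" = some gate_id
    then some (PySem.Dict.ofList r).items
    else pvScanRev rest gate_id

def latest_human_decision_py (state : List (String × List (List (String × String)))) (gate_id : String) : Option (List (String × String)) :=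
  let decisions := (PySem.Dict.ofList state).getD "human_decision_log" []
  pvScanRev decisions.reverse gate_id

-- ===== PORT B =====
def latest_human_decision_py_alt (state : List (String × List (List (String × String)))) (gate_id : String) : Option (List (String × String)) :=
  let decisions := (PySem.Dict.ofList state).getD "human_decision_log" []
  let index : PySem.Dict (Option String) (List (String × String)) :=
    decisions.foldl
      (fun idx r =>
        idx.insert ((PySem.Dict.ofList r).get? "gate_id") (PySem.Dict.ofList r).items)
      PySem.Dict.empty
  index.get? (some gate_id)

-- ===== PRECONDITION & SPEC =====
def Spec_latest_human_decision_py (state : List (String × List (List (String × String)))) (gate_id : String) (out : Option (List (String × String))) : Prop := out = latest_human_decision_py_alt state gate_id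
instance (state : List (String × List (List (String × String)))) (gate_id : String) (out : Option (List (String × String))) : Decidable (Spec_latest_human_decision_py state gate_id out) := by unfold Spec_latest_human_decision_py; infer_instance

-- ===== CLAIM (what is proved, stated in full; the proofs are below) =====
def Claim_equal_latest_human_decision_py : Prop := ∀ (state : List (String × List (List (String × String)))) (gate_id : String), Dom_latest_human_decision_py state gate_id → Spec_latest_human_decision_py state gate_id (latest_human_decision_py state gate_id)

-- ===== LEMMAS AND PROOFS =====

theorem pvScanRev_append (xs ys : List (List (String × String))) (g : String) :
    pvScanRev (xs ++ ys) g =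
      match pvScanRev xs g with
      | some v => some v
      | none => pvScanRev ys g := by
  induction xs with
  | nil => simp [pvScanRev]
  | cons r rest ih =>
    simp only [List.cons_append, pvScanRev]
    split_ifs <;> simp [ih]

theorem pvFoldl_get (l : List (List (String × String)))
    (idx : PySem.Dict (Option String) (List (String × String))) (g : String) :
    (l.foldl (fun idx r =>
        idx.insert ((PySem.Dict.ofList r).get? "gate_id") (PySem.Dict.ofList r).items) idx).get?
      (some g) =
      match pvScanRev l.reverse g with
      | some v => some v
      | none => idx.get? (some g) := by
  induction l generalizing idx with
  | nil => simp [pvScanRev]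
  | cons r rest ih =>
    rw [List.foldl_cons, ih, List.reverse_cons, pvScanRev_append]
    rcases h : pvScanRev rest.reverse g with _ | v
    · simp only [pvScanRev, PySem.Dict.get?_insert]
      by_cases hk : (PySem.Dict.ofList r).get? "gate_id" = some g
      · rw [if_pos hk.symm, if_pos hk]
      · rw [if_neg (fun e => hk e.symm), if_neg hk]
    · rfl

-- ===== VERDICT (by name: the statement is the Claim_ definition above) =====
theorem latest_human_decision_py_spec : Claim_equal_latest_human_decision_py := by
  intro state gate_id _
  show _ = _
  unfold latest_human_decision_py latest_human_decision_py_alt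
  simp only [pvFoldl_get, PySem.Dict.get?_empty]
  rcases h : pvScanRev ((PySem.Dict.ofList state).getD "human_decision_log" []).reverse gate_id <;> simp
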